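-- pv_equiv track=rewrite | github.com/francissayer/set-anubis | setanubis/alp_calculate_visible_br.py | classify_alp_decay_visibility
-- ===== SOURCE A (Python) =====
-- def classify_alp_decay_visibility(daughters):
--     """
--     Classify ALP decay mode visibility for ANUBIS detector.
--
--     PDG codes:
--         22: photon (typically invisible/escapes detector)
--         21: gluon (produces hadronic jet)
--         ±11: e±
--         ±13: μ±
--         ±15: τ±
--         ±12, ±14, ±16: neutrinos (invisible)
--         ±1,2,3,4,5,6: quarks (produce hadrons)
--         23: Z boson
--         24: W± boson
--         25: Higgs
--
--     Returns:
--         str: Category of decay ('photons', 'leptons', 'quarks', 'bosons', 'mixed', 'invisible')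
--     """
--     abs_daughters = [abs(d) for d in daughters]
--
--     # Count different particle types
--     n_photons = sum(1 for d in abs_daughters if d == 22)
--     n_gluons = sum(1 for d in abs_daughters if d == 21)
--     n_charged_leptons = sum(1 for d in abs_daughters if d in [11, 13, 15])
--     n_neutrinos = sum(1 for d in abs_daughters if d in [12, 14, 16])
--     n_quarks = sum(1 for d in abs_daughters if d in [1, 2, 3, 4, 5, 6])
--     n_bosons = sum(1 for d in abs_daughters if d in [23, 24, 25])
--
--     # Classification
--     if n_photons >= 2 and len(abs_daughters) == 2:
--         return 'photons'  # Pure photon decays (diphoton final state)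
--     elif n_charged_leptons >= 2:
--         return 'leptons'  # Charged lepton pairs (visible)
--     elif n_charged_leptons == 1:
--         return 'semi-leptonic'  # One lepton + something else
--     elif n_quarks >= 2 or n_gluons >= 2:
--         return 'hadronic'  # Quarks/gluons (jets)
--     elif n_bosons > 0:
--         return 'bosons'  # Decays to W/Z/H
--     elif n_photons > 0:
--         return 'photonic'  # Photons mixed with other particles
--     elif n_neutrinos > 0:
--         return 'invisible'  # Only neutrinos
--     else:
--         return 'other'
-- ===== SOURCE B (Python) =====
-- def classify_alp_decay_visibility(daughters):
--     # Finite-state scan: O(1) state regardless of input size — photon/gluon/quark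
--     # tallies saturate at 2, neutrino/boson are flags, length saturates at 3, and
--     # the scan exits early the moment a second charged lepton decides the verdict.
--     ph = gl = cl = qk = n = 0
--     nu = bo = False
--     for d in daughters:
--         a = abs(d)
--         n = min(n + 1, 3)
--         if a in (11, 13, 15):
--             cl += 1
--             if cl == 2:
--                 return 'leptons'
--         elif a == 22:
--             ph = min(ph + 1, 2)
--         elif a == 21:
--             gl = min(gl + 1, 2)
--         elif a in (1, 2, 3, 4, 5, 6):
--             qk = min(qk + 1, 2)
--         elif a in (12, 14, 16):
--             nu = True
--         elif a in (23, 24, 25):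
--             bo = True
--     if ph >= 2 and n == 2:
--         return 'photons'
--     if cl == 1:
--         return 'semi-leptonic'
--     if qk >= 2 or gl >= 2:
--         return 'hadronic'
--     if bo:
--         return 'bosons'
--     if ph > 0:
--         return 'photonic'
--     if nu:
--         return 'invisible'
--     return 'other'
-- ===== Notes on version B (the rewrite author's own statement) =====
-- stated objective: alternative
-- what changed: Replaces A's six full counting scans plus a count-based cascade by a finite-state machine: one scan whose state is O(1) (tallies saturate at 2, neutrino/boson collapse to flags, length saturates at 3) and which returns 'leptons' early as soon as a second charged lepton is seen, reading the saturated state afterwards.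
import Mathlib
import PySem

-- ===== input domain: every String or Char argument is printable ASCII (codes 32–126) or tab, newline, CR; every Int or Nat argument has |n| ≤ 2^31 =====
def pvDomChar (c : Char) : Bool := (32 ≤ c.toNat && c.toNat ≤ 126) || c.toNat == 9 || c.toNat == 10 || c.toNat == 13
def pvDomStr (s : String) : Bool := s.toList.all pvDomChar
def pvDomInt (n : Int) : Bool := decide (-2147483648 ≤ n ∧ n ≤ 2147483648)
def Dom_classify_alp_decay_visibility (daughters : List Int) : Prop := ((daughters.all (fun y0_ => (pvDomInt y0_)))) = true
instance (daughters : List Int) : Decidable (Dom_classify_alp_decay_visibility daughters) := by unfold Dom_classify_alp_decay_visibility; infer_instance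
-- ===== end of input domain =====

-- B replaces A's six full counting scans by a single finite-state scan: the state is
-- constant-size (tallies saturate at 2, neutrino/boson are flags, length saturates at 3)
-- and the scan returns 'leptons' early on a second charged lepton (objective: alternative).

-- ===== PORT A =====
def classify_alp_decay_visibility (daughters : List Int) : String :=
  let abs_daughters := daughters.map (fun d => |d|)
  let n_photons := List.foldl (fun acc d => if d == (22:Int) then acc + 1 else acc) (0:Int) abs_daughters
  let n_gluons := List.foldl (fun acc d => if d == (21:Int) then acc + 1 else acc) (0:Int) abs_daughters
  let n_charged_leptons := List.foldl (fun acc d => if [(11:Int), 13, 15].contains d then acc + 1 else acc) (0:Int) abs_daughters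
  let n_neutrinos := List.foldl (fun acc d => if [(12:Int), 14, 16].contains d then acc + 1 else acc) (0:Int) abs_daughters
  let n_quarks := List.foldl (fun acc d => if [(1:Int), 2, 3, 4, 5, 6].contains d then acc + 1 else acc) (0:Int) abs_daughters
  let n_bosons := List.foldl (fun acc d => if [(23:Int), 24, 25].contains d then acc + 1 else acc) (0:Int) abs_daughters
  if n_photons ≥ 2 ∧ abs_daughters.length = 2 then "photons"
  else if n_charged_leptons ≥ 2 then "leptons"
  else if n_charged_leptons = 1 then "semi-leptonic"
  else if n_quarks ≥ 2 ∨ n_gluons ≥ 2 then "hadronic"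
  else if n_bosons > 0 then "bosons"
  else if n_photons > 0 then "photonic"
  else if n_neutrinos > 0 then "invisible"
  else "other"

-- ===== PORT B =====
-- the loop of Source B: state (ph, gl, cl, qk, nu, bo, n), early return on a second charged lepton
def pvGo (ph gl cl qk : Int) (nu bo : Bool) (n : Int) : List Int → String
  | [] =>
    if ph ≥ 2 ∧ n = 2 then "photons"
    else if cl = 1 then "semi-leptonic"
    else if qk ≥ 2 ∨ gl ≥ 2 then "hadronic"
    else if bo then "bosons"
    else if ph > 0 then "photonic"
    else if nu then "invisible"
    else "other"
  | x :: xs =>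
    let a := |x|
    let n' := min (n + 1) 3
    if [(11:Int), 13, 15].contains a then
      if cl + 1 = 2 then "leptons" else pvGo ph gl (cl + 1) qk nu bo n' xs
    else if a == 22 then pvGo (min (ph + 1) 2) gl cl qk nu bo n' xs
    else if a == 21 then pvGo ph (min (gl + 1) 2) cl qk nu bo n' xs
    else if [(1:Int), 2, 3, 4, 5, 6].contains a then pvGo ph gl cl (min (qk + 1) 2) nu bo n' xs
    else if [(12:Int), 14, 16].contains a then pvGo ph gl cl qk true bo n' xs
    else if [(23:Int), 24, 25].contains a then pvGo ph gl cl qk nu true n' xs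
    else pvGo ph gl cl qk nu bo n' xs

def classify_alp_decay_visibility_alt (daughters : List Int) : String :=
  pvGo 0 0 0 0 false false 0 daughters

-- ===== PRECONDITION & SPEC =====
def Spec_classify_alp_decay_visibility (daughters : List Int) (out : String) : Prop := out = classify_alp_decay_visibility_alt daughters
instance (daughters : List Int) (out : String) : Decidable (Spec_classify_alp_decay_visibility daughters out) := by unfold Spec_classify_alp_decay_visibility; infer_instance

-- ===== CLAIM (what is proved, stated in full; the proofs are below) =====
def Claim_equal_classify_alp_decay_visibility : Prop := ∀ (daughters : List Int), Dom_classify_alp_decay_visibility daughters → Spec_classify_alp_decay_visibility daughters (classify_alp_decay_visibility daughters)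

-- ===== LEMMAS AND PROOFS =====

-- A's six counts, named (over the abs-mapped list, exactly A's predicates)
def cPh (xs : List Int) : Nat := (xs.map (fun d => |d|)).countP (fun d => d == (22:Int))
def cGl (xs : List Int) : Nat := (xs.map (fun d => |d|)).countP (fun d => d == (21:Int))
def cCl (xs : List Int) : Nat := (xs.map (fun d => |d|)).countP (fun d => [(11:Int), 13, 15].contains d)
def cNu (xs : List Int) : Nat := (xs.map (fun d => |d|)).countP (fun d => [(12:Int), 14, 16].contains d)
def cQk (xs : List Int) : Nat := (xs.map (fun d => |d|)).countP (fun d => [(1:Int), 2, 3, 4, 5, 6].contains d)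
def cBo (xs : List Int) : Nat := (xs.map (fun d => |d|)).countP (fun d => [(23:Int), 24, 25].contains d)

-- A's decision chain on the real counts
def pvAdec (P G C Q B N : Int) (L : Nat) : String :=
  if P ≥ 2 ∧ L = 2 then "photons"
  else if C ≥ 2 then "leptons"
  else if C = 1 then "semi-leptonic"
  else if Q ≥ 2 ∨ G ≥ 2 then "hadronic"
  else if B > 0 then "bosons"
  else if P > 0 then "photonic"
  else if N > 0 then "invisible"
  else "other"

theorem A_eq_dec (xs : List Int) :
    classify_alp_decay_visibility xs
      = pvAdec (cPh xs) (cGl xs) (cCl xs) (cQk xs) (cBo xs) (cNu xs) xs.length := by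
  simp only [classify_alp_decay_visibility, PySem.List.foldl_if_add_one, zero_add,
    List.length_map, pvAdec, cPh, cGl, cCl, cQk, cBo, cNu]
  rfl

-- one cons step of all six counts, as Int equations with Prop-conditioned increments
theorem countsAll (x : Int) (xs : List Int) :
    ((cPh (x :: xs) : Int) = cPh xs + (if |x| = 22 then 1 else 0))
    ∧ ((cGl (x :: xs) : Int) = cGl xs + (if |x| = 21 then 1 else 0))
    ∧ ((cCl (x :: xs) : Int) = cCl xs + (if |x| = 11 ∨ |x| = 13 ∨ |x| = 15 then 1 else 0))
    ∧ ((cQk (x :: xs) : Int) = cQk xs + (if |x| = 1 ∨ |x| = 2 ∨ |x| = 3 ∨ |x| = 4 ∨ |x| = 5 ∨ |x| = 6 then 1 else 0))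
    ∧ ((cBo (x :: xs) : Int) = cBo xs + (if |x| = 23 ∨ |x| = 24 ∨ |x| = 25 then 1 else 0))
    ∧ ((cNu (x :: xs) : Int) = cNu xs + (if |x| = 12 ∨ |x| = 14 ∨ |x| = 16 then 1 else 0)) := by
  refine ⟨?_, ?_, ?_, ?_, ?_, ?_⟩ <;>
  · simp only [cPh, cGl, cCl, cQk, cBo, cNu, List.map_cons, List.countP_cons,
      List.contains_eq_mem, List.mem_cons, List.not_mem_nil, or_false, beq_iff_eq,
      decide_eq_true_eq]
    push_cast
    split_ifs <;> omega

-- charged leptons and photons are disjoint categories: together at most the length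
theorem cPh_add_cCl_le (xs : List Int) : (cPh xs : Int) + cCl xs ≤ xs.length := by
  induction xs with
  | nil => simp [cPh, cCl]
  | cons x xs ih =>
    obtain ⟨f1, _, f3, _, _, _⟩ := countsAll x xs
    rw [f1, f3]
    simp only [List.length_cons]
    split_ifs <;> push_cast <;> omega

-- the invariant of B's scan: from a state that saturates the prior real counts,
-- pvGo computes A's decision on the full real counts
set_option maxHeartbeats 1000000 in
theorem pvGo_eq (xs : List Int) : ∀ (P G C Q B N : Int) (L : Nat),
    0 ≤ P → 0 ≤ G → 0 ≤ Q → 0 ≤ C → C ≤ 1 → 0 ≤ N → 0 ≤ B → P + C ≤ (L : Int) →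
    pvGo (min P 2) (min G 2) C (min Q 2) (decide (0 < N)) (decide (0 < B)) (min (L : Int) 3) xs
      = pvAdec (P + cPh xs) (G + cGl xs) (C + cCl xs) (Q + cQk xs) (B + cBo xs) (N + cNu xs)
          (L + xs.length) := by
  induction xs with
  | nil =>
    intro P G C Q B N L hP hG hQ hC0 hC1 hN hB hPC
    simp only [pvGo, pvAdec, cPh, cGl, cCl, cQk, cBo, cNu, List.map_nil, List.countP_nil,
      List.length_nil, Nat.cast_zero, add_zero, decide_eq_true_eq]
    split_ifs <;> first | rfl | omega
  | cons x xs ih =>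
    intro P G C Q B N L hP hG hQ hC0 hC1 hN hB hPC
    have hn : min (min (L : Int) 3 + 1) 3 = min ((L + 1 : Nat) : Int) 3 := by push_cast; omega
    obtain ⟨f1, f2, f3, f4, f5, f6⟩ := countsAll x xs
    simp only [pvGo]
    by_cases h1 : ([(11:Int), 13, 15].contains |x|) = true
    · rw [if_pos h1]
      have hx : |x| = 11 ∨ |x| = 13 ∨ |x| = 15 := by
        simpa [List.contains_eq_mem] using h1
      have e3 : (cCl (x :: xs) : Int) = cCl xs + 1 := by rw [f3, if_pos hx]
      by_cases h2 : C + 1 = 2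
      · rw [if_pos h2]
        have hdisj := cPh_add_cCl_le (x :: xs)
        -- the photon branch is impossible (photons + ≥2 charged leptons exceed a length of 2),
        -- the lepton test holds, so A also answers "leptons"
        simp only [pvAdec, List.length_cons]
        simp only [List.length_cons] at hdisj
        rw [e3] at hdisj
        rw [e3]
        split_ifs with hA hB2 <;> first | rfl | (exfalso; omega)
      · rw [if_neg h2, hn, ih P G (C + 1) Q B N (L + 1) hP hG hQ (by omega) (by omega) hN hB
          (by push_cast; omega)]
        simp only [f1, f2, f3, f4, f5, f6, List.length_cons]
        clear f1 f2 f3 f4 f5 f6 ih hn h1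
        congr 1 <;> first | omega | (split_ifs <;> omega)
    · rw [if_neg h1]
      have hxn : ¬(|x| = 11 ∨ |x| = 13 ∨ |x| = 15) := by
        simpa [List.contains_eq_mem] using h1
      by_cases h2 : (|x| == (22:Int)) = true
      · have hx : |x| = 22 := by simpa using h2
        rw [if_pos h2]
        have e : min (min P 2 + 1) 2 = min (P + 1) 2 := by omega
        rw [e, hn, ih (P + 1) G C Q B N (L + 1) (by omega) hG hQ hC0 hC1 hN hB (by push_cast; omega)]
        simp only [f1, f2, f3, f4, f5, f6, List.length_cons]
        clear f1 f2 f3 f4 f5 f6 ih hn h1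
        congr 1 <;> first | omega | (split_ifs <;> omega)
      · rw [if_neg h2]
        by_cases h3 : (|x| == (21:Int)) = true
        · have hx : |x| = 21 := by simpa using h3
          rw [if_pos h3]
          have e : min (min G 2 + 1) 2 = min (G + 1) 2 := by omega
          rw [e, hn, ih P (G + 1) C Q B N (L + 1) hP (by omega) hQ hC0 hC1 hN hB (by push_cast; omega)]
          simp only [f1, f2, f3, f4, f5, f6, List.length_cons]
          clear f1 f2 f3 f4 f5 f6 ih hn h1
          congr 1 <;> first | omega | (split_ifs <;> omega)
        · rw [if_neg h3]
          by_cases h4 : ([(1:Int), 2, 3, 4, 5, 6].contains |x|) = true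
          · rw [if_pos h4]
            have hx : |x| = 1 ∨ |x| = 2 ∨ |x| = 3 ∨ |x| = 4 ∨ |x| = 5 ∨ |x| = 6 := by
              simpa [List.contains_eq_mem] using h4
            have e : min (min Q 2 + 1) 2 = min (Q + 1) 2 := by omega
            rw [e, hn, ih P G C (Q + 1) B N (L + 1) hP hG (by omega) hC0 hC1 hN hB (by push_cast; omega)]
            simp only [f1, f2, f3, f4, f5, f6, List.length_cons]
            clear f1 f2 f3 f4 f5 f6 ih hn h1
            congr 1 <;> first | omega | (split_ifs <;> omega)
          · rw [if_neg h4]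
            by_cases h5 : ([(12:Int), 14, 16].contains |x|) = true
            · rw [if_pos h5]
              have hx : |x| = 12 ∨ |x| = 14 ∨ |x| = 16 := by
                simpa [List.contains_eq_mem] using h5
              have e : (true : Bool) = decide (0 < N + 1) := by simp; omega
              rw [e, hn, ih P G C Q B (N + 1) (L + 1) hP hG hQ hC0 hC1 (by omega) hB (by push_cast; omega)]
              simp only [f1, f2, f3, f4, f5, f6, List.length_cons]
              clear f1 f2 f3 f4 f5 f6 ih hn h1
              congr 1 <;> first | omega | (split_ifs <;> omega)
            · rw [if_neg h5]
              by_cases h6 : ([(23:Int), 24, 25].contains |x|) = true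
              · rw [if_pos h6]
                have hx : |x| = 23 ∨ |x| = 24 ∨ |x| = 25 := by
                  simpa [List.contains_eq_mem] using h6
                have e : (true : Bool) = decide (0 < B + 1) := by simp; omega
                rw [e, hn, ih P G C Q (B + 1) N (L + 1) hP hG hQ hC0 hC1 hN (by omega) (by push_cast; omega)]
                simp only [f1, f2, f3, f4, f5, f6, List.length_cons]
                clear f1 f2 f3 f4 f5 f6 ih hn h1
                congr 1 <;> first | omega | (split_ifs <;> omega)
              · rw [if_neg h6, hn, ih P G C Q B N (L + 1) hP hG hQ hC0 hC1 hN hB (by push_cast; omega)]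
                have hx22 : ¬(|x| = 22) := by simpa using h2
                have hx21 : ¬(|x| = 21) := by simpa using h3
                have hxq : ¬(|x| = 1 ∨ |x| = 2 ∨ |x| = 3 ∨ |x| = 4 ∨ |x| = 5 ∨ |x| = 6) := by
                  simpa [List.contains_eq_mem] using h4
                have hxnu : ¬(|x| = 12 ∨ |x| = 14 ∨ |x| = 16) := by
                  simpa [List.contains_eq_mem] using h5
                have hxbo : ¬(|x| = 23 ∨ |x| = 24 ∨ |x| = 25) := by
                  simpa [List.contains_eq_mem] using h6
                simp only [f1, f2, f3, f4, f5, f6, List.length_cons]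
                clear f1 f2 f3 f4 f5 f6 ih hn h1
                congr 1 <;> first | omega | (split_ifs <;> omega)

-- ===== VERDICT (by name: the statement is the Claim_ definition above) =====
theorem classify_alp_decay_visibility_spec : Claim_equal_classify_alp_decay_visibility := by
  intro xs _
  unfold Spec_classify_alp_decay_visibility classify_alp_decay_visibility_alt
  have h := pvGo_eq xs 0 0 0 0 0 0 0 (by omega) (by omega) (by omega) (by omega) (by omega)
    (by omega) (by omega) (by simp)
  norm_num at h
  rw [A_eq_dec, ← h]
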